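-- pv_equiv track=rewrite | github.com/k3395403326/reptiles | reptiles/tencent_video_scraper/svip_handler.py | _select_best_quality
-- ===== SOURCE A (Python) =====
-- from typing import List, Dict, Optional, Any
--
-- def _select_best_quality(urls: List[str]) -> Optional[str]:
--     """选择最佳画质的视频链接"""
--     if not urls:
--         return None
--
--     # 按画质优先级排序
--     quality_priority = ['1080', 'fhd', '720', 'hd', '480', 'sd']
--
--     for quality in quality_priority:
--         for url in urls:
--             if quality in url.lower():
--                 return url
--
--     # 如果没有找到特定画质，返回第一个
--     return urls[0]
-- ===== SOURCE B (Python) =====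
-- from typing import List, Optional
--
-- def _select_best_quality(urls: List[str]) -> Optional[str]:
--     """选择最佳画质的视频链接"""
--     if not urls:
--         return None
--
--     quality_priority = ['1080', 'fhd', '720', 'hd', '480', 'sd']
--
--     def rank(url):
--         lu = url.lower()
--         for i, quality in enumerate(quality_priority):
--             if quality in lu:
--                 return i
--         return len(quality_priority)
--
--     best = urls[0]
--     best_rank = rank(best)
--     for url in urls[1:]:
--         r = rank(url)
--         if r < best_rank:
--             best, best_rank = url, r
--     return best
-- ===== Notes on version B (the rewrite author's own statement) =====
-- stated objective: alternative
-- what changed: Replaced the priority-outer nested scan (rescanning all urls once per quality keyword) by a single pass over the urls keeping the url of smallest priority rank, with strict-less updates so the earliest url wins ties and the urls[0] fallback arises naturally from the initial accumulator.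
import Mathlib
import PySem

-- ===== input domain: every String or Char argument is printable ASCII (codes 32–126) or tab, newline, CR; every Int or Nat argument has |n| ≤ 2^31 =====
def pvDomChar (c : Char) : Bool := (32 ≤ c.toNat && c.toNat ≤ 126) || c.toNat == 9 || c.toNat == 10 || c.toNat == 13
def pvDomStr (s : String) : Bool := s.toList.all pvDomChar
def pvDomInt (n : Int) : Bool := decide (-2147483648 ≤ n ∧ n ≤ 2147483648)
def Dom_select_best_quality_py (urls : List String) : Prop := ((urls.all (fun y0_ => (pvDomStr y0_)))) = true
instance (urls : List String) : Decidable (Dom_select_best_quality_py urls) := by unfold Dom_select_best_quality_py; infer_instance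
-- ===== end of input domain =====

-- B replaces A's priority-outer nested scan by a single pass over urls keeping the
-- smallest-rank url (strict-less update, so the earliest url wins ties): an
-- alternative decomposition of the same selection, not claimed faster.


-- ===== PORT A =====
def pvPriorities : List String := ["1080", "fhd", "720", "hd", "480", "sd"]

-- the inner 'for url in urls: if quality in url.lower(): return url'
def pvALoopUrls (q : String) : List String → Option String
  | [] => none
  | u :: rest =>
    if PySem.Str.isIn q (PySem.Str.lower u) then some u else pvALoopUrls q rest

-- the outer 'for quality in quality_priority' with early return
def pvALoop : List String → List String → Option String
  | [], _ => none
  | q :: qs, urls =>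
    match pvALoopUrls q urls with
    | some u => some u
    | none => pvALoop qs urls

def select_best_quality_py (urls : List String) : Option String :=
  match urls with
  | [] => none
  | u :: rest =>
    match pvALoop pvPriorities (u :: rest) with
    | some w => some w
    | none => PySem.List.pyGet? (u :: rest) 0   -- 'return urls[0]' (urls nonempty here)

-- ===== PORT B =====
-- rank(url): 'for i, quality in enumerate(...): if quality in lu: return i; return len(...)'
-- (the recursion adds 1 per missed priority, computing the index of the first hit, else the length)
def pvRank (lu : String) : List String → Nat
  | [] => 0
  | q :: qs => if PySem.Str.isIn q lu then 0 else pvRank lu qs + 1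

def pvRankOf (u : String) : Nat := pvRank (PySem.Str.lower u) pvPriorities

def select_best_quality_py_alt (urls : List String) : Option String :=
  match urls with
  | [] => none
  | u0 :: rest =>
    some ((rest.foldl (fun acc u =>
      let r := pvRankOf u
      if r < acc.2 then (u, r) else acc) (u0, pvRankOf u0)).1)

-- ===== PRECONDITION & SPEC =====
def Spec_select_best_quality_py (urls : List String) (out : Option String) : Prop := out = select_best_quality_py_alt urls
instance (urls : List String) (out : Option String) : Decidable (Spec_select_best_quality_py urls out) := by unfold Spec_select_best_quality_py; infer_instance

-- ===== CLAIM (what is proved, stated in full; the proofs are below) =====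
def Claim_equal_select_best_quality_py : Prop := ∀ (urls : List String), Dom_select_best_quality_py urls → Spec_select_best_quality_py urls (select_best_quality_py urls)

-- ===== LEMMAS AND PROOFS =====

set_option maxHeartbeats 800000

-- left-biased minimum on (url, rank) pairs
def pvM2 (a b : String × Nat) : String × Nat := if a.2 ≤ b.2 then a else b

def pvM2o (a : String × Nat) : Option (String × Nat) → String × Nat
  | none => a
  | some b => pvM2 a b

-- first minimal-rank element of a nonempty url list, w.r.t. priority list ps
def pvFm (ps : List String) : List String → Option (String × Nat)
  | [] => none
  | v :: r => some (pvM2o (v, pvRank (PySem.Str.lower v) ps) (pvFm ps r))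

def pvG (ps : List String) (u : String) (l : List String) : String × Nat :=
  pvM2o (u, pvRank (PySem.Str.lower u) ps) (pvFm ps l)

theorem pvM2o_some (a b : String × Nat) : pvM2o a (some b) = pvM2 a b := rfl

theorem pvFm_cons (ps : List String) (v : String) (r : List String) :
    pvFm ps (v :: r) = some (pvM2o (v, pvRank (PySem.Str.lower v) ps) (pvFm ps r)) := rfl

theorem pvRankOf_eq (u : String) : pvRankOf u = pvRank (PySem.Str.lower u) pvPriorities := rfl

theorem pvG_nil (ps : List String) (u : String) :
    pvG ps u [] = (u, pvRank (PySem.Str.lower u) ps) := rfl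

theorem pvG_cons (ps : List String) (u v : String) (l : List String) :
    pvG ps u (v :: l) = pvM2 (u, pvRank (PySem.Str.lower u) ps) (pvG ps v l) := by
  unfold pvG
  rw [pvFm_cons, pvM2o_some]

theorem pvRank_hit (lu q : String) (qs : List String)
    (hq : PySem.Str.isIn q lu = true) : pvRank lu (q :: qs) = 0 := by
  simp only [pvRank]
  rw [if_pos hq]

theorem pvRank_miss (lu q : String) (qs : List String)
    (hq : ¬ PySem.Str.isIn q lu = true) : pvRank lu (q :: qs) = pvRank lu qs + 1 := by
  simp only [pvRank]
  rw [if_neg hq]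

theorem pvALoopUrls_cons (q u : String) (rest : List String) :
    pvALoopUrls q (u :: rest)
      = if PySem.Str.isIn q (PySem.Str.lower u) then some u else pvALoopUrls q rest := rfl

theorem pvRank_le (lu : String) (ps : List String) : pvRank lu ps ≤ ps.length := by
  induction ps with
  | nil => exact Nat.le_refl 0
  | cons q qs ih =>
    simp only [pvRank, List.length_cons]
    split <;> omega

theorem pvM2_assoc (a b c : String × Nat) : pvM2 (pvM2 a b) c = pvM2 a (pvM2 b c) := by
  unfold pvM2
  split_ifs <;> first | rfl | omega

theorem pvM2_cases (a b : String × Nat) :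
    pvM2 a b = a ∨ (pvM2 a b = b ∧ b.2 < a.2) := by
  unfold pvM2
  split_ifs with h
  · exact Or.inl rfl
  · exact Or.inr ⟨rfl, by omega⟩

theorem pvM2o_m2 (a b : String × Nat) (o : Option (String × Nat)) :
    pvM2o (pvM2 a b) o = pvM2 a (pvM2o b o) := by
  cases o with
  | none => rfl
  | some c => exact pvM2_assoc a b c

theorem pvFoldl_eq (l : List String) (a : String × Nat) :
    l.foldl (fun acc u => let r := pvRankOf u; if r < acc.2 then (u, r) else acc) a
      = pvM2o a (pvFm pvPriorities l) := by
  induction l generalizing a with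
  | nil => rfl
  | cons v r ih =>
    have hstep : (let r := pvRankOf v; if r < a.2 then (v, r) else a)
        = pvM2 a (v, pvRankOf v) := by
      show (if pvRankOf v < a.2 then (v, pvRankOf v) else a) = pvM2 a (v, pvRankOf v)
      unfold pvM2
      rcases Nat.lt_or_ge (pvRankOf v) a.2 with h | h
      · rw [if_pos h, if_neg (by omega)]
      · rw [if_neg (by omega), if_pos (by omega)]
    rw [List.foldl_cons, hstep, ih, pvM2o_m2, pvFm_cons, pvM2o_some, pvRankOf_eq]

theorem pvG_snd_le (ps : List String) (u : String) (l : List String) :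
    (pvG ps u l).2 ≤ ps.length := by
  induction l generalizing u with
  | nil =>
    rw [pvG_nil]
    exact pvRank_le _ _
  | cons v r ih =>
    rw [pvG_cons]
    rcases pvM2_cases (u, pvRank (PySem.Str.lower u) ps) (pvG ps v r) with hc | ⟨hc, _⟩
    · rw [hc]; exact pvRank_le _ _
    · rw [hc]; exact ih v

theorem pvG_fst_of_max (ps : List String) (u : String) (l : List String)
    (h : (pvG ps u l).2 = ps.length) : (pvG ps u l).1 = u := by
  cases l with
  | nil => rw [pvG_nil]
  | cons v r =>
    rw [pvG_cons] at h ⊢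
    rcases pvM2_cases (u, pvRank (PySem.Str.lower u) ps) (pvG ps v r) with hc | ⟨hc, hlt⟩
    · rw [hc]
    · exfalso
      rw [hc] at h
      have h1 : ((u, pvRank (PySem.Str.lower u) ps) : String × Nat).2
          = pvRank (PySem.Str.lower u) ps := rfl
      have h2 := pvRank_le (PySem.Str.lower u) ps
      omega

-- hit case: if some url contains q, pvG for (q::qs) is (first such url, 0)
theorem pvG_hit (q : String) (qs : List String) (u : String) (l : List String) (w : String)
    (h : pvALoopUrls q (u :: l) = some w) : pvG (q :: qs) u l = (w, 0) := by
  induction l generalizing u with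
  | nil =>
    rw [pvALoopUrls_cons] at h
    by_cases hq : PySem.Str.isIn q (PySem.Str.lower u) = true
    · rw [if_pos hq] at h
      injection h with h
      subst h
      rw [pvG_nil, pvRank_hit _ _ _ hq]
    · rw [if_neg hq] at h
      exact absurd h (by simp [pvALoopUrls])
  | cons v r ih =>
    rw [pvALoopUrls_cons] at h
    by_cases hq : PySem.Str.isIn q (PySem.Str.lower u) = true
    · rw [if_pos hq] at h
      injection h with h
      subst h
      rw [pvG_cons, pvRank_hit _ _ _ hq]
      unfold pvM2
      rw [if_pos (Nat.zero_le _)]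
    · rw [if_neg hq] at h
      have ihv := ih v h
      rw [pvG_cons, ihv, pvRank_miss _ _ _ hq]
      unfold pvM2
      rw [if_neg (by omega)]

theorem pvM2_shift (a1 b1 : String) (x y : Nat) :
    pvM2 (a1, x + 1) (b1, y + 1) = ((pvM2 (a1, x) (b1, y)).1, (pvM2 (a1, x) (b1, y)).2 + 1) := by
  unfold pvM2
  split_ifs <;> first | rfl | omega

-- miss case: if no url contains q, pvG for (q::qs) is pvG for qs with rank shifted by one
theorem pvG_miss (q : String) (qs : List String) (u : String) (l : List String)
    (h : pvALoopUrls q (u :: l) = none) :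
    pvG (q :: qs) u l = ((pvG qs u l).1, (pvG qs u l).2 + 1) := by
  induction l generalizing u with
  | nil =>
    rw [pvALoopUrls_cons] at h
    by_cases hq : PySem.Str.isIn q (PySem.Str.lower u) = true
    · rw [if_pos hq] at h
      exact absurd h (by simp)
    · rw [pvG_nil, pvG_nil, pvRank_miss _ _ _ hq]
  | cons v r ih =>
    rw [pvALoopUrls_cons] at h
    by_cases hq : PySem.Str.isIn q (PySem.Str.lower u) = true
    · rw [if_pos hq] at h
      exact absurd h (by simp)
    · rw [if_neg hq] at h
      have ihv := ih v h
      rw [pvG_cons, ihv, pvRank_miss _ _ _ hq]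
      cases hgv : pvG qs v r with
      | mk b1 y =>
        rw [pvG_cons, hgv, pvM2_shift]

-- A's nested loops find the first minimal-rank url iff its rank beats ps.length
theorem pvALoop_eq (ps : List String) (u : String) (l : List String) :
    pvALoop ps (u :: l)
      = if (pvG ps u l).2 < ps.length then some (pvG ps u l).1 else none := by
  induction ps with
  | nil => simp [pvALoop]
  | cons q qs ih =>
    cases h : pvALoopUrls q (u :: l) with
    | some w =>
      have hg := pvG_hit q qs u l w h
      simp only [pvALoop, h, hg, List.length_cons]
      simp
    | none =>
      have hg := pvG_miss q qs u l h
      simp only [pvALoop, h, ih, hg, List.length_cons]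
      split_ifs <;> first | rfl | omega

-- ===== VERDICT (by name: the statement is the Claim_ definition above) =====
theorem select_best_quality_py_spec : Claim_equal_select_best_quality_py := by
  intro urls _
  unfold Spec_select_best_quality_py
  cases urls with
  | nil => rfl
  | cons u0 rest =>
    have hb : select_best_quality_py_alt (u0 :: rest) = some (pvG pvPriorities u0 rest).1 := by
      simp only [select_best_quality_py_alt]
      rw [pvFoldl_eq, pvRankOf_eq]
      rfl
    rw [hb]
    simp only [select_best_quality_py]
    rw [pvALoop_eq]
    by_cases h : (pvG pvPriorities u0 rest).2 < pvPriorities.length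
    · rw [if_pos h]
    · rw [if_neg h]
      have h6 : (pvG pvPriorities u0 rest).2 = pvPriorities.length := by
        have := pvG_snd_le pvPriorities u0 rest
        omega
      rw [PySem.List.pyGet?_zero_cons, pvG_fst_of_max pvPriorities u0 rest h6]
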